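-- pv_equiv track=rewrite | github.com/ZephyR35/Python | Lesson_05/Task_02.py | iterator_with_yield_adv_2
-- ===== SOURCE A (Python) =====
-- def iterator_with_yield_adv_2(n):
--     i = 1
--     summ = 0
--     while i <= n:
--         if i %2 != 0:
--             summ += i
--             if i**2<200:
--                 yield (i,summ)
--         i+=1
-- ===== SOURCE B (Python) =====
-- def iterator_with_yield_adv_2(n):
--     i = 1
--     while i <= n and i * i < 200:
--         yield (i, ((i + 1) // 2) ** 2)
--         i += 2
-- ===== Notes on version B (the rewrite author's own statement) =====
-- stated objective: faster
-- what changed: B replaces A's scan of every integer up to n with an accumulator by a step-2 walk over odd i only, stopped by the i*i < 200 cutoff, computing each running sum by the closed form ((i+1)//2)**2 (sum of first k odds = k^2), so B does at most 7 iterations regardless of n while A does n.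
import Mathlib
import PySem

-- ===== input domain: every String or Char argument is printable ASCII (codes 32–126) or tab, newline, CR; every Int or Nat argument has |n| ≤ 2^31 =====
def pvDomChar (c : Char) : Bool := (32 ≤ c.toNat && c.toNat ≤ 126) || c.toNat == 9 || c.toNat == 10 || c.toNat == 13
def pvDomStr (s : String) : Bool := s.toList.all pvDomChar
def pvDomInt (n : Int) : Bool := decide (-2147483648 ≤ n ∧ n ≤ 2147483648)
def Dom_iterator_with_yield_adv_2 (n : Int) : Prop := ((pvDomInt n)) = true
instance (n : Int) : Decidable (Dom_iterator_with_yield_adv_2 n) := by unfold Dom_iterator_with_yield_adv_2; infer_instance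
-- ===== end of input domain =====

-- B replaces A's accumulator scan of all integers up to n by a step-2 walk over odd i with the
-- closed form ((i+1)//2)**2 for the running sum; equivalence is proved for all Int n.

-- ===== PORT A =====
-- A's while loop 'while i <= n', transliterated as structural recursion on a fuel equal to the
-- exact number of loop iterations (n.toNat, since i runs 1..n); fuel is only a totality device.
def pvLoopA (fuel : Nat) (n i summ : Int) (acc : List (Int × Int)) : List (Int × Int) :=
  match fuel with
  | 0 => acc
  | f + 1 =>
    if i ≤ n then
      if i % 2 ≠ 0 then
        if i ^ 2 < 200 then
          pvLoopA f n (i + 1) (summ + i) (acc ++ [(i, summ + i)])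
        else
          pvLoopA f n (i + 1) (summ + i) acc
      else
        pvLoopA f n (i + 1) summ acc
    else acc

def iterator_with_yield_adv_2 (n : Int) : List (Int × Int) := pvLoopA n.toNat n 1 0 []

-- ===== PORT B =====
-- B's while loop 'while i <= n and i*i < 200', i += 2; the guard i*i < 200 fails at i = 15, so 8
-- units of fuel always suffice from i = 1; fuel is only a totality device.
def pvLoopB (fuel : Nat) (n i : Int) : List (Int × Int) :=
  match fuel with
  | 0 => []
  | f + 1 =>
    if i ≤ n ∧ i * i < 200 then
      (i, (PySem.Int.floordiv (i + 1) 2) ^ 2) :: pvLoopB f n (i + 2)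
    else []

def iterator_with_yield_adv_2_alt (n : Int) : List (Int × Int) := pvLoopB 8 n 1

-- ===== PRECONDITION & SPEC =====
def Spec_iterator_with_yield_adv_2 (n : Int) (out : List (Int × Int)) : Prop := out = iterator_with_yield_adv_2_alt n
instance (n : Int) (out : List (Int × Int)) : Decidable (Spec_iterator_with_yield_adv_2 n out) := by unfold Spec_iterator_with_yield_adv_2; infer_instance

-- ===== CLAIM (what is proved, stated in full; the proofs are below) =====
def Claim_equal_iterator_with_yield_adv_2 : Prop := ∀ (n : Int), Dom_iterator_with_yield_adv_2 n → Spec_iterator_with_yield_adv_2 n (iterator_with_yield_adv_2 n)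

-- ===== LEMMAS AND PROOFS =====

-- past i = 15 A's loop keeps running but never yields again
theorem pvLoopA_tail (fuel : Nat) (n i summ : Int) (h : 15 ≤ i) :
    ∀ acc, pvLoopA fuel n i summ acc = acc := by
  induction fuel generalizing i summ with
  | zero => intro acc; rfl
  | succ f ih =>
    intro acc
    simp only [pvLoopA]
    split_ifs with h1 h2 h3
    · exfalso; nlinarith
    · exact ih (i + 1) (summ + i) (by omega) acc
    · exact ih (i + 1) summ (by omega) acc
    · rfl

-- ===== VERDICT (by name: the statement is the Claim_ definition above) =====
theorem iterator_with_yield_adv_2_spec : Claim_equal_iterator_with_yield_adv_2 := by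
  intro n _
  unfold Spec_iterator_with_yield_adv_2 iterator_with_yield_adv_2 iterator_with_yield_adv_2_alt
  by_cases hge : (1:Int) ≤ n
  case neg =>
    have hz : n.toNat = 0 := by omega
    simp [hz, pvLoopA, pvLoopB, hge]
  case pos =>
  by_cases hle : n ≤ 14
  · interval_cases n <;> decide
  · have hgt : 14 < n := by omega
    have e : n.toNat = (n - 14).toNat + 14 := by omega
    rw [e]
    simp [pvLoopA, pvLoopB, PySem.Int.floordiv,
      pvLoopA_tail ((n - 14).toNat) n 15 49 (by omega),
      show (1:Int) ≤ n by omega, show (2:Int) ≤ n by omega, show (3:Int) ≤ n by omega,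
      show (4:Int) ≤ n by omega, show (5:Int) ≤ n by omega, show (6:Int) ≤ n by omega,
      show (7:Int) ≤ n by omega, show (8:Int) ≤ n by omega, show (9:Int) ≤ n by omega,
      show (10:Int) ≤ n by omega, show (11:Int) ≤ n by omega, show (12:Int) ≤ n by omega,
      show (13:Int) ≤ n by omega, show (14:Int) ≤ n by omega]
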